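-- pv_equiv track=rewrite | github.com/LucksLab/spats | spats_shape_seq/tag.py | _longest_unmatched
-- ===== SOURCE A (Python) =====
-- def _longest_unmatched(seq, tags):
--     lstart, llen = 0, 0
--     idx = 0
--     while idx <= len(tags):
--         if 0 == idx:
--             start = 0
--             tlen = tags[idx][1] if len(tags) > 0 else len(seq)
--         elif idx == len(tags):
--             tag = tags[idx - 1]
--             start = tag[1] + tag[2]
--             tlen = len(seq) - start
--         else:
--             t1 = tags[idx - 1]
--             t2 = tags[idx]
--             start = t1[1] + t1[2]
--             tlen = t2[1] - start
--         if tlen > llen: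
--             lstart = start
--             llen = tlen
--         idx += 1
--     return lstart, llen
-- ===== SOURCE B (Python) =====
-- def _longest_unmatched(seq, tags):
--     # Recursive back-to-front: compute the best gap of the suffix, then let the
--     # current gap win ties (>=), which yields the leftmost maximal gap; finally
--     # keep it only if its length is positive, else the (0, 0) default.
--     def go(prev_end, rest):
--         if not rest:
--             return (prev_end, len(seq) - prev_end)
--         t = rest[0]
--         tail = go(t[1] + t[2], rest[1:])
--         cur = (prev_end, t[1] - prev_end)
--         return cur if cur[1] >= tail[1] else tail
--     best = go(0, tags)
--     return best if best[1] > 0 else (0, 0)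
-- ===== Notes on version B (the rewrite author's own statement) =====
-- stated objective: alternative
-- what changed: Replaced A's forward index loop with running-best state and idx==0/idx==len branching by a structural recursion over the tag list carrying the previous end: it selects the leftmost maximal gap back-to-front with a >= tie rule, then applies a final positivity check to yield the (0,0) default.
import Mathlib
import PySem

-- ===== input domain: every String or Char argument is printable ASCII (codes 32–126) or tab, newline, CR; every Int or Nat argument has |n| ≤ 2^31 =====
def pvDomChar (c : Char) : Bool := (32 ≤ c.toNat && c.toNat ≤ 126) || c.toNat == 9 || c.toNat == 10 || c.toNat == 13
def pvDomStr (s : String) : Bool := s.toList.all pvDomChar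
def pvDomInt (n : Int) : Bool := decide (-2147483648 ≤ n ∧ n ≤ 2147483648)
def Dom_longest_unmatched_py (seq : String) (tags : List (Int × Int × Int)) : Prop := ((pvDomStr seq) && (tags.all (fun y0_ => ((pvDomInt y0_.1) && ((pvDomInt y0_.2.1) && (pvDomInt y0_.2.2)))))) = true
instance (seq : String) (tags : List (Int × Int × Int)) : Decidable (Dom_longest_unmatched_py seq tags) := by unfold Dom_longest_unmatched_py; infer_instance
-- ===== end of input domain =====

-- B replaces A's forward index loop (running best, branch per position) by a structural
-- recursion over the tag list carrying the previous end, selecting the leftmost maximal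
-- gap back-to-front with a >= tie rule and a final positivity check (objective: alternative).

-- ===== PORT A =====
-- the (start, tlen) computed by A's loop body at position idx (the three branches, in order)
def luGapAt (seq : String) (tags : List (Int × Int × Int)) (idx : Nat) : Int × Int :=
  if idx = 0 then
    (0, if tags.length > 0 then (tags.getD 0 (0, 0, 0)).2.1 else PySem.Str.len seq)
  else if idx = tags.length then
    let tag := tags.getD (idx - 1) (0, 0, 0)
    let start := tag.2.1 + tag.2.2
    (start, PySem.Str.len seq - start)
  else
    let t1 := tags.getD (idx - 1) (0, 0, 0)
    let t2 := tags.getD idx (0, 0, 0)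
    let start := t1.2.1 + t1.2.2
    (start, t2.2.1 - start)

-- the 'if tlen > llen' running-best update
def luStep (seq : String) (tags : List (Int × Int × Int)) (st : Int × Int) (idx : Nat) : Int × Int :=
  let g := luGapAt seq tags idx
  if g.2 > st.2 then g else st

-- while idx <= len(tags): … ; idx += 1   as a fold over the visited indices 0..len(tags)
def longest_unmatched_py (seq : String) (tags : List (Int × Int × Int)) : Int × Int :=
  (List.range (tags.length + 1)).foldl (luStep seq tags) (0, 0)

-- ===== PORT B =====
-- Source B's inner 'go': recursion over the remaining tags, carrying the previous end
def luGo (seq : String) : Int → List (Int × Int × Int) → Int × Int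
  | prev_end, [] => (prev_end, PySem.Str.len seq - prev_end)
  | prev_end, t :: rest =>
      let tail := luGo seq (t.2.1 + t.2.2) rest
      let cur := (prev_end, t.2.1 - prev_end)
      if cur.2 ≥ tail.2 then cur else tail

def longest_unmatched_py_alt (seq : String) (tags : List (Int × Int × Int)) : Int × Int :=
  let best := luGo seq 0 tags
  if best.2 > 0 then best else (0, 0)

-- ===== PRECONDITION & SPEC =====
def Spec_longest_unmatched_py (seq : String) (tags : List (Int × Int × Int)) (out : Int × Int) : Prop := out = longest_unmatched_py_alt seq tags
instance (seq : String) (tags : List (Int × Int × Int)) (out : Int × Int) : Decidable (Spec_longest_unmatched_py seq tags out) := by unfold Spec_longest_unmatched_py; infer_instance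

-- ===== CLAIM (what is proved, stated in full; the proofs are below) =====
def Claim_equal_longest_unmatched_py : Prop := ∀ (seq : String) (tags : List (Int × Int × Int)), Dom_longest_unmatched_py seq tags → Spec_longest_unmatched_py seq tags (longest_unmatched_py seq tags)

-- ===== LEMMAS AND PROOFS =====

-- the list of gaps, starting from a given previous end (proof-only helper)
def luGaps (L : Int) : Int → List (Int × Int × Int) → List (Int × Int)
  | p, [] => [(p, L - p)]
  | p, t :: rest => (p, t.2.1 - p) :: luGaps L (t.2.1 + t.2.2) rest

-- leftmost maximal element by second component, ties to the left (proof-only helper)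
def luFmL : List (Int × Int) → Int × Int
  | [] => (0, 0)
  | [g] => g
  | g :: h :: t => let r := luFmL (h :: t); if g.2 ≥ r.2 then g else r

theorem luGaps_ne_nil (L p : Int) (l : List (Int × Int × Int)) : luGaps L p l ≠ [] := by
  cases l <;> simp [luGaps]

theorem luFmL_cons (g : Int × Int) (gs : List (Int × Int)) (h : gs ≠ []) :
    luFmL (g :: gs) = if g.2 ≥ (luFmL gs).2 then g else luFmL gs := by
  cases gs with
  | nil => exact absurd rfl h
  | cons a t => rfl

-- A's gap list in zip form (same statement as in the build-then-select reading of A)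
theorem gaps_zip (seq : String) (tags : List (Int × Int × Int)) :
    (((0 : Int) :: tags.map (fun t => t.2.1 + t.2.2)).zip
        (tags.map (fun t => t.2.1) ++ [PySem.Str.len seq])).map (fun p => (p.1, p.2 - p.1))
      = (List.range (tags.length + 1)).map (luGapAt seq tags) := by
  apply List.ext_getElem
  · simp
  · intro i h1 h2
    simp only [List.length_map, List.length_zip, List.length_cons, List.length_append,
      List.length_range, List.length_map] at h1 h2
    have hi : i < tags.length + 1 := by omega
    simp only [List.getElem_map, List.getElem_zip, List.getElem_range]
    rcases Nat.eq_zero_or_pos i with hz | hpos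
    · subst hz
      rcases tags with _ | ⟨t, ts⟩
      · simp [luGapAt, PySem.Str.len]
      · simp [luGapAt, List.getD]
    · have hi1 : i - 1 < tags.length := by omega
      have hne : i ≠ 0 := by omega
      have hgs : ((0 : Int) :: tags.map (fun t => t.2.1 + t.2.2))[i]'(by simp; omega) =
          (tags[i - 1]'hi1).2.1 + (tags[i - 1]'hi1).2.2 := by
        rcases i with _ | j
        · omega
        · simp
      rw [hgs]
      by_cases hlast : i = tags.length
      · have : (tags.map (fun t => t.2.1) ++ [PySem.Str.len seq])[i]'(by simp; omega) =
            PySem.Str.len seq := by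
          rw [List.getElem_append_right (by simp [hlast])]
          simp [hlast]
        rw [this]
        subst hlast
        have htne : tags ≠ [] := by intro h; subst h; simp at hpos
        simp [luGapAt, htne, List.getD_eq_getElem?_getD, List.getElem?_eq_getElem hi1]
      · have him : i < tags.length := by omega
        have : (tags.map (fun t => t.2.1) ++ [PySem.Str.len seq])[i]'(by simp; omega) =
            (tags[i]'him).2.1 := by
          rw [List.getElem_append_left (by simpa using him)]
          simp
        rw [this]
        simp [luGapAt, hne, hlast, List.getD_eq_getElem?_getD,
          List.getElem?_eq_getElem hi1, List.getElem?_eq_getElem him]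

-- the zip form is exactly B's gap recursion, for any starting previous end
theorem luGaps_zip (L : Int) (tags : List (Int × Int × Int)) : ∀ p : Int,
    ((p :: tags.map (fun t => t.2.1 + t.2.2)).zip
        (tags.map (fun t => t.2.1) ++ [L])).map (fun q => (q.1, q.2 - q.1))
      = luGaps L p tags := by
  induction tags with
  | nil => intro p; simp [luGaps]
  | cons t rest ih =>
    intro p
    simp only [List.map_cons, List.cons_append, List.zip_cons_cons, List.map_cons, luGaps]
    rw [ih]

theorem gaps_eq (seq : String) (tags : List (Int × Int × Int)) :
    (List.range (tags.length + 1)).map (luGapAt seq tags)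
      = luGaps (PySem.Str.len seq) 0 tags := by
  rw [← gaps_zip, luGaps_zip]

-- A's running-best fold over a nonempty gap list is the leftmost maximum, guarded by st
theorem foldl_fm (l : List (Int × Int)) : ∀ (g st : Int × Int),
    (g :: l).foldl (fun m x => if x.2 > m.2 then x else m) st
      = if (luFmL (g :: l)).2 > st.2 then luFmL (g :: l) else st := by
  induction l with
  | nil =>
    intro g st
    simp [luFmL]
  | cons h t ih =>
    intro g st
    have hfm : luFmL (g :: h :: t) = if g.2 ≥ (luFmL (h :: t)).2 then g else luFmL (h :: t) :=
      luFmL_cons g (h :: t) (by simp)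
    have : (g :: h :: t).foldl (fun m x => if x.2 > m.2 then x else m) st
        = (h :: t).foldl (fun m x => if x.2 > m.2 then x else m)
            (if g.2 > st.2 then g else st) := by
      simp [List.foldl_cons]
    rw [this, ih, hfm]
    by_cases h1 : g.2 ≥ (luFmL (h :: t)).2 <;>
      by_cases h2 : g.2 > st.2 <;>
      simp only [h1, h2] <;>
      split_ifs <;> first | rfl | (exfalso; omega)

-- B's recursion computes the leftmost maximum of the gap list
theorem luGo_fm (seq : String) : ∀ (l : List (Int × Int × Int)) (p : Int),
    luGo seq p l = luFmL (luGaps (PySem.Str.len seq) p l) := by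
  intro l
  induction l with
  | nil => intro p; simp [luGo, luGaps, luFmL]
  | cons t rest ih =>
    intro p
    simp only [luGo, luGaps]
    rw [luFmL_cons _ _ (luGaps_ne_nil _ _ _), ih]

theorem longest_unmatched_eq (seq : String) (tags : List (Int × Int × Int)) :
    longest_unmatched_py seq tags = longest_unmatched_py_alt seq tags := by
  simp only [longest_unmatched_py, longest_unmatched_py_alt]
  have hfold : (List.range (tags.length + 1)).foldl (luStep seq tags) (0, 0)
      = ((List.range (tags.length + 1)).map (luGapAt seq tags)).foldl
          (fun m x => if x.2 > m.2 then x else m) ((0 : Int), (0 : Int)) := by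
    rw [List.foldl_map]
    rfl
  rw [hfold, gaps_eq, luGo_fm]
  rcases h : luGaps (PySem.Str.len seq) 0 tags with _ | ⟨g, l⟩
  · exact absurd h (luGaps_ne_nil _ _ _)
  · rw [foldl_fm]

-- ===== VERDICT (by name: the statement is the Claim_ definition above) =====
theorem longest_unmatched_py_spec : Claim_equal_longest_unmatched_py := by
  intro seq tags _
  unfold Spec_longest_unmatched_py
  exact longest_unmatched_eq seq tags
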